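-- pv_equiv track=rewrite | github.com/verkal1999/Manufacturing-ExcH-Agents | MSRGuard_Anpassung/python/msrguard/excH_chatbot.py | _extract_var_declaration_block
-- ===== SOURCE A (Python) =====
-- from typing import Any, Dict, Optional, List, Set, Tuple
--
-- def _extract_var_declaration_block(header_text: str, max_chars: int = 3500) -> str:
--     header = str(header_text or "")
--     if not header:
--         return ""
--
--     lines = header.splitlines()
--     blocks: List[str] = []
--     in_var_block = False
--
--     for raw in lines:
--         line = raw.rstrip()
--         upper = line.strip().upper()
--         if upper.startswith("VAR"):
--             in_var_block = True
--             blocks.append(line)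
--             continue
--         if in_var_block:
--             blocks.append(line)
--             if upper.startswith("END_VAR"):
--                 in_var_block = False
--
--     if not blocks:
--         fallback = [ln.rstrip() for ln in lines if ":" in ln and ";" in ln]
--         blocks = fallback[:80]
--
--     text = "\n".join(blocks).strip()
--     if len(text) > max_chars:
--         text = text[:max_chars] + "\n... (gekuerzt)"
--     return text
-- ===== SOURCE B (Python) =====
-- def _is_var_start(line):
--     return line.strip().upper().startswith("VAR")
--
--
-- def _is_var_end(line):
--     return line.strip().upper().startswith("END_VAR")
--
--
-- def _split_at_end(lines):
--     # (block body up to and including the first END_VAR line, remainder);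
--     # with no END_VAR the whole list is the body.
--     for k, ln in enumerate(lines):
--         if _is_var_end(ln):
--             return lines[:k + 1], lines[k + 1:]
--     return lines, []
--
--
-- def _collect_blocks(lines):
--     blocks = []
--     rest = lines
--     while rest:
--         head, tail = rest[0], rest[1:]
--         if _is_var_start(head):
--             body, rest = _split_at_end(tail)
--             blocks += [head] + body
--         else:
--             rest = tail
--     return blocks
--
--
-- def _extract_var_declaration_block(header_text: str, max_chars: int = 3500) -> str:
--     header = str(header_text or "")
--     if not header:
--         return ""
--     lines = [raw.rstrip() for raw in header.splitlines()]
--     blocks = _collect_blocks(lines)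
--     if not blocks:
--         blocks = [ln for ln in lines if ":" in ln and ";" in ln][:80]
--     text = "\n".join(blocks).strip()
--     if len(text) > max_chars:
--         text = text[:max_chars] + "\n... (gekuerzt)"
--     return text
-- ===== Notes on version B (the rewrite author's own statement) =====
-- stated objective: alternative
-- what changed: A's single flag-driven loop over raw lines is replaced by a recursive block collector over once-rstripped lines: on each VAR header it locates the closing END_VAR line with a helper and takes the whole block at once, then continues after it.
import Mathlib
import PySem

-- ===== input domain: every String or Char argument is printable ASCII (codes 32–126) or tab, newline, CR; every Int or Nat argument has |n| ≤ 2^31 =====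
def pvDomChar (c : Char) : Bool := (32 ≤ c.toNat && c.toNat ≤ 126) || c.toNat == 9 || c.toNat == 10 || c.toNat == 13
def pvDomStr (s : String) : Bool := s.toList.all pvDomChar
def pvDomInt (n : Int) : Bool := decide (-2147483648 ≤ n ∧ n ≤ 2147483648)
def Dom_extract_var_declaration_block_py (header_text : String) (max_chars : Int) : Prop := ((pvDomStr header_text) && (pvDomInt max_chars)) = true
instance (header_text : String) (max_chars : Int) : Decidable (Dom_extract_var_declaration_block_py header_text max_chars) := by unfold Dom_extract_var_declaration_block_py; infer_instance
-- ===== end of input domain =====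

-- B replaces A's flag-driven single loop by a recursive block collector (scan to the
-- END_VAR line of each opened block and take the block at once), rstripping all lines
-- up front; objective: alternative decomposition, same cost.

-- ===== PORT A =====
-- literal transliteration of Source A: one fold over the raw lines with the
-- (blocks, in_var_block) state; 'str(header_text or "")' on a str argument is
-- header_text itself, so 'if not header' is the empty-string test.
def extract_var_declaration_block_py (header_text : String) (max_chars : Int) : String :=
  if header_text = "" then "" else
  let lines := PySem.Str.splitlines header_text
  let st := lines.foldl (fun (st : List String × Bool) raw =>
      let line := PySem.Str.rstrip raw
      let upper := PySem.Str.upper (PySem.Str.strip line)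
      if PySem.Str.startswith upper "VAR" then (st.1 ++ [line], true)
      else if st.2 then (st.1 ++ [line], !(PySem.Str.startswith upper "END_VAR"))
      else st) ([], false)
  let blocks := st.1
  let blocks := if blocks = [] then
      ((lines.filter (fun ln => PySem.Str.isIn ":" ln && PySem.Str.isIn ";" ln)).map PySem.Str.rstrip).take 80
    else blocks
  let text := PySem.Str.strip (PySem.Str.join "\n" blocks)
  if max_chars < (PySem.Str.len text : Int) then
    PySem.Str.slice text none (some max_chars) ++ "\n... (gekuerzt)"
  else text

-- ===== PORT B =====
-- Source B's _is_var_start / _is_var_end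
def pvIsVarStart (line : String) : Bool :=
  PySem.Str.startswith (PySem.Str.upper (PySem.Str.strip line)) "VAR"

def pvIsVarEnd (line : String) : Bool :=
  PySem.Str.startswith (PySem.Str.upper (PySem.Str.strip line)) "END_VAR"

-- Source B's _split_at_end: scan for the first END_VAR line; (body incl. it, remainder),
-- or (everything, []) when the block is never closed.
def pvSplitAtEnd : List String → List String × List String
  | [] => ([], [])
  | ln :: rest =>
      if pvIsVarEnd ln then ([ln], rest)
      else ((ln :: (pvSplitAtEnd rest).1), (pvSplitAtEnd rest).2)

-- needed by pvCollectBlocks' termination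
theorem pvSplitAtEnd_snd_length : ∀ (ls : List String), (pvSplitAtEnd ls).2.length ≤ ls.length
  | [] => Nat.le_refl _
  | ln :: rest => by
      unfold pvSplitAtEnd
      by_cases h : pvIsVarEnd ln = true <;> simp [h]
      exact Nat.le_succ_of_le (pvSplitAtEnd_snd_length rest)

-- Source B's _collect_blocks: on a VAR line take the whole block at once, then continue.
def pvCollectBlocks : List String → List String
  | [] => []
  | head :: tail =>
      if pvIsVarStart head then
        head :: ((pvSplitAtEnd tail).1 ++ pvCollectBlocks (pvSplitAtEnd tail).2)
      else pvCollectBlocks tail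
termination_by ls => ls.length
decreasing_by
  · exact Nat.lt_succ_of_le (pvSplitAtEnd_snd_length tail)
  · exact Nat.lt_succ_self _

def extract_var_declaration_block_py_alt (header_text : String) (max_chars : Int) : String :=
  if header_text = "" then "" else
  let lines := (PySem.Str.splitlines header_text).map PySem.Str.rstrip
  let blocks := pvCollectBlocks lines
  let blocks := if blocks = [] then
      (lines.filter (fun ln => PySem.Str.isIn ":" ln && PySem.Str.isIn ";" ln)).take 80
    else blocks
  let text := PySem.Str.strip (PySem.Str.join "\n" blocks)
  if max_chars < (PySem.Str.len text : Int) then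
    PySem.Str.slice text none (some max_chars) ++ "\n... (gekuerzt)"
  else text

-- ===== PRECONDITION & SPEC =====
def Spec_extract_var_declaration_block_py (header_text : String) (max_chars : Int) (out : String) : Prop := out = extract_var_declaration_block_py_alt header_text max_chars
instance (header_text : String) (max_chars : Int) (out : String) : Decidable (Spec_extract_var_declaration_block_py header_text max_chars out) := by unfold Spec_extract_var_declaration_block_py; infer_instance

-- ===== CLAIM (what is proved, stated in full; the proofs are below) =====
def Claim_equal_extract_var_declaration_block_py : Prop := ∀ (header_text : String) (max_chars : Int), Dom_extract_var_declaration_block_py header_text max_chars → Spec_extract_var_declaration_block_py header_text max_chars (extract_var_declaration_block_py header_text max_chars)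

-- ===== LEMMAS AND PROOFS =====

-- A's loop step, on an already-rstripped line (definitionally A's lambda body).
def pvStepA (st : List String × Bool) (line : String) : List String × Bool :=
  if pvIsVarStart line then (st.1 ++ [line], true)
  else if st.2 then (st.1 ++ [line], !(pvIsVarEnd line))
  else st

theorem pvIsVarEnd_not_start (ln : String) (h : pvIsVarEnd ln = true) :
    pvIsVarStart ln = false := by
  unfold pvIsVarEnd at h
  unfold pvIsVarStart
  rw [PySem.Str.startswith_eq, PySem.Chars.startswith_iff] at h
  rw [PySem.Str.startswith_eq, Bool.eq_false_iff]
  intro hc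
  rw [PySem.Chars.startswith_iff] at hc
  rcases h with ⟨t1, h1⟩
  rcases hc with ⟨t2, h2⟩
  rw [← h1] at h2
  rw [show "END_VAR".toList = ['E','N','D','_','V','A','R'] from by decide,
      show "VAR".toList = ['V','A','R'] from by decide] at h2
  simp at h2

theorem pvStepA_shift (st : List String × Bool) (ln : String) :
    pvStepA st ln = (st.1 ++ (pvStepA ([], st.2) ln).1, (pvStepA ([], st.2) ln).2) := by
  rcases st with ⟨a, f⟩
  unfold pvStepA
  dsimp only
  split_ifs <;> simp_all

theorem pvFold_shift (ls : List String) (st : List String × Bool) :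
    (List.foldl pvStepA st ls).1 = st.1 ++ (List.foldl pvStepA ([], st.2) ls).1 := by
  induction ls generalizing st with
  | nil => simp
  | cons ln rest ih =>
      rw [List.foldl_cons, List.foldl_cons, ih (pvStepA st ln), ih (pvStepA ([], st.2) ln)]
      rw [pvStepA_shift st ln]
      simp [List.append_assoc]

theorem pvFold_true (ls : List String) :
    (List.foldl pvStepA ([], true) ls).1 =
      (pvSplitAtEnd ls).1 ++ (List.foldl pvStepA ([], false) (pvSplitAtEnd ls).2).1 := by
  induction ls with
  | nil => simp [pvSplitAtEnd]
  | cons ln rest ih =>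
      by_cases he : pvIsVarEnd ln = true
      · have hs := pvIsVarEnd_not_start ln he
        have hstep : pvStepA ([], true) ln = ([ln], false) := by
          unfold pvStepA; rw [hs]; simp [he]
        rw [List.foldl_cons, hstep]
        unfold pvSplitAtEnd
        rw [if_pos he]
        rw [pvFold_shift rest ([ln], false)]
      · have hstep : pvStepA ([], true) ln = ([ln], true) := by
          unfold pvStepA
          by_cases hp : pvIsVarStart ln = true <;> simp [hp, he]
        rw [List.foldl_cons, hstep]
        unfold pvSplitAtEnd
        rw [if_neg he]
        rw [pvFold_shift rest ([ln], true), ih]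
        simp

theorem pvFold_false (ls : List String) :
    (List.foldl pvStepA ([], false) ls).1 = pvCollectBlocks ls := by
  induction ls using pvCollectBlocks.induct with
  | case1 => simp [pvCollectBlocks]
  | case2 head tail hp ih =>
      have hstep : pvStepA ([], false) head = ([head], true) := by
        unfold pvStepA; rw [if_pos hp]; rfl
      rw [List.foldl_cons, hstep, pvFold_shift tail ([head], true)]
      rw [pvFold_true, ih]
      rw [pvCollectBlocks]
      rw [if_pos hp]
      simp
  | case3 head tail hp ih =>
      have hstep : pvStepA ([], false) head = ([], false) := by
        unfold pvStepA; rw [if_neg hp]; rfl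
      rw [List.foldl_cons, hstep, ih]
      rw [pvCollectBlocks]
      rw [if_neg hp]

-- membership of a non-whitespace character survives rstrip
theorem pvMem_rstrip (c : Char) (hc : PySem.Chars.isspace c = false) (l : List Char) :
    c ∈ PySem.Chars.rstrip l ↔ c ∈ l := by
  unfold PySem.Chars.rstrip
  rw [List.mem_reverse]
  constructor
  · intro h
    have := (List.dropWhile_sublist (p := PySem.Chars.isspace) (l := l.reverse)).mem h
    simpa using this
  · intro h
    have hrev : c ∈ l.reverse := by simpa using h
    rw [← List.takeWhile_append_dropWhile (p := PySem.Chars.isspace) (l := l.reverse),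
        List.mem_append] at hrev
    rcases hrev with h1 | h1
    · have := List.mem_takeWhile_imp h1
      rw [hc] at this
      cases this
    · exact h1

theorem pvIsIn_rstrip (sub : String) (c : Char) (hsub : sub.toList = [c])
    (hc : PySem.Chars.isspace c = false) (ln : String) :
    PySem.Str.isIn sub (PySem.Str.rstrip ln) = PySem.Str.isIn sub ln := by
  rw [Bool.eq_iff_iff, PySem.Str.isIn_iff_infix, PySem.Str.isIn_iff_infix]
  have h2 : (PySem.Str.rstrip ln).toList = PySem.Chars.rstrip ln.toList := by simp
  rw [hsub, h2, List.singleton_infix_iff, List.singleton_infix_iff]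
  exact pvMem_rstrip c hc ln.toList

theorem pvFallback_eq (lines : List String) :
    ((lines.filter (fun ln => PySem.Str.isIn ":" ln && PySem.Str.isIn ";" ln)).map PySem.Str.rstrip)
      = (lines.map PySem.Str.rstrip).filter (fun ln => PySem.Str.isIn ":" ln && PySem.Str.isIn ";" ln) := by
  rw [List.filter_map]
  congr 1
  apply List.filter_congr
  intro ln _
  simp only [Function.comp_apply]
  rw [pvIsIn_rstrip ":" ':' (by decide) (by decide) ln,
      pvIsIn_rstrip ";" ';' (by decide) (by decide) ln]

-- ===== VERDICT (by name: the statement is the Claim_ definition above) =====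
theorem extract_var_declaration_block_py_spec : Claim_equal_extract_var_declaration_block_py := by
  intro header_text max_chars _
  unfold Spec_extract_var_declaration_block_py
  unfold extract_var_declaration_block_py extract_var_declaration_block_py_alt
  by_cases h : header_text = ""
  · simp [h]
  · rw [if_neg h, if_neg h]
    have hfold : ∀ (lines : List String),
        (List.foldl (fun (st : List String × Bool) raw =>
            let line := PySem.Str.rstrip raw
            let upper := PySem.Str.upper (PySem.Str.strip line)
            if PySem.Str.startswith upper "VAR" then (st.1 ++ [line], true)
            else if st.2 then (st.1 ++ [line], !(PySem.Str.startswith upper "END_VAR"))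
            else st) ([], false) lines).1
          = pvCollectBlocks (lines.map PySem.Str.rstrip) := by
      intro lines
      rw [show (fun (st : List String × Bool) raw =>
            let line := PySem.Str.rstrip raw
            let upper := PySem.Str.upper (PySem.Str.strip line)
            if PySem.Str.startswith upper "VAR" then (st.1 ++ [line], true)
            else if st.2 then (st.1 ++ [line], !(PySem.Str.startswith upper "END_VAR"))
            else st) = (fun st raw => pvStepA st (PySem.Str.rstrip raw)) from rfl]
      rw [← List.foldl_map]
      exact pvFold_false _
    simp only [hfold, pvFallback_eq]
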